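-- pv_equiv track=rewrite | github.com/Sabermahjoub/Graph-Theory-Algorithms-with-Python | directed_graphs/strongly_connected.py | getOrderedVertices
-- ===== SOURCE A (Python) =====
-- def getOrderedVertices(finish_times):
--     n = len(finish_times)
--     order = []
--     treated = [False] * n  # To keep track of treated vertices
--     for _ in range(n):
--         max_val = float('-inf')  # Initialize max_val to negative infinity
--         max_index = -1
--         for i in range(n):
--             if not treated[i] and finish_times[i] > max_val:
--                 max_val = finish_times[i]
--                 max_index = i
--         order.append(max_index + 1)  # Append the vertex with the maximum finish time
--         treated[max_index] = True  # Mark the vertex as treated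
--     return order
-- ===== SOURCE B (Python) =====
-- def getOrderedVertices(finish_times):
--     pairs = sorted((-ft, i) for i, ft in enumerate(finish_times))
--     return [i + 1 for _, i in pairs]
-- ===== Notes on version B (the rewrite author's own statement) =====
-- stated objective: faster
-- what changed: Replaces A's n repeated linear selection scans over a treated[] array by building (-finish_time, index) pairs once and sorting them (tuple order reproduces A's strict-'>' max selection with ties to the smallest index).
import Mathlib
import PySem

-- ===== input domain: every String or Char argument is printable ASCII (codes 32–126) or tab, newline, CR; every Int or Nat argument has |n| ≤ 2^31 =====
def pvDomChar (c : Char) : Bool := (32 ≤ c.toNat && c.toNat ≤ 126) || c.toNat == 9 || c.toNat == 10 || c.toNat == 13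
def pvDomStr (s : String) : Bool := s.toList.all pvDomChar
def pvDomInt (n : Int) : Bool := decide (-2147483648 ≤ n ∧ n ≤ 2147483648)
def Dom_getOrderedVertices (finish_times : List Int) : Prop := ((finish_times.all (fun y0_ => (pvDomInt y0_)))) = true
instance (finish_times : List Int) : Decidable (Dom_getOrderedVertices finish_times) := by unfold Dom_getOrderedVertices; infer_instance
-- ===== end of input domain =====

-- B replaces A's repeated selection scan by a single sort of (-finish_time, index) pairs.

-- ===== PORT A =====
-- 'finish_times[i] > max_val' where max_val starts at float('-inf'); none models -inf
-- (exact here: every Int compares greater than -inf).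
def pvGtNegInf (x : Int) (mv : Option Int) : Bool :=
  match mv with
  | none => true
  | some v => decide (v < x)

def getOrderedVertices (finish_times : List Int) : List Int :=
  let n := finish_times.length
  -- the inner 'for i in range(n)' only reads treated[i] / finish_times[i] with 0 ≤ i < n,
  -- so getD is exact for those reads.
  ((List.range n).foldl (fun (st : List Int × List Bool) _ =>
      let inner := (List.range n).foldl (fun (mv : Option Int × Int) i =>
          if (!(st.2.getD i false)) && pvGtNegInf (finish_times.getD i 0) mv.1 then
            (some (finish_times.getD i 0), (i : Int))
          else mv) (none, -1)
      -- 'treated[max_index] = True': a negative index would wrap in Python; ported faithfully.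
      let idx := if inner.2 < 0 then inner.2 + (n : Int) else inner.2
      (st.1 ++ [inner.2 + 1], st.2.set idx.toNat true))
    (([] : List Int), List.replicate n false)).1

-- ===== PORT B =====
def getOrderedVertices_alt (finish_times : List Int) : List Int :=
  let pairs := (PySem.List.enumerate finish_times 0).map (fun q => (-q.2, q.1))
  (PySem.List.sorted2 pairs Prod.fst Prod.snd false).map (fun p => p.2 + 1)

-- ===== PRECONDITION & SPEC =====
def Spec_getOrderedVertices (finish_times : List Int) (out : List Int) : Prop := out = getOrderedVertices_alt finish_times
instance (finish_times : List Int) (out : List Int) : Decidable (Spec_getOrderedVertices finish_times out) := by unfold Spec_getOrderedVertices; infer_instance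

-- ===== CLAIM (what is proved, stated in full; the proofs are below) =====
def Claim_equal_getOrderedVertices : Prop := ∀ (finish_times : List Int), Dom_getOrderedVertices finish_times → Spec_getOrderedVertices finish_times (getOrderedVertices finish_times)

-- ===== LEMMAS AND PROOFS =====

-- output entry of index j
def pvSucc (j : Nat) : Int := (j : Int) + 1

-- the sort key of index j: (-finish_times[j], j)
def pvPair (ft : List Int) (j : Nat) : Int × Int := (-(ft[j]?.getD 0), (j : Int))

-- Python's lexicographic strict order on such pairs
def pvLt (a b : Int × Int) : Prop := a.1 < b.1 ∨ (a.1 = b.1 ∧ a.2 < b.2)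

-- the inner selection step, as in port A
def pvInnerF (ft : List Int) (treated : List Bool) (mv : Option Int × Int) (i : Nat) :
    Option Int × Int :=
  if (!(treated[i]?.getD false)) && pvGtNegInf (ft[i]?.getD 0) mv.1 then
    (some (ft[i]?.getD 0), (i : Int))
  else mv

-- one outer iteration, as in port A
def pvOuterF (ft : List Int) (st : List Int × List Bool) (_x : Nat) : List Int × List Bool :=
  let inner := (List.range ft.length).foldl (pvInnerF ft st.2) (none, -1)
  let idx := if inner.2 < 0 then inner.2 + (ft.length : Int) else inner.2
  (st.1 ++ [inner.2 + 1], st.2.set idx.toNat true)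

theorem pvLt_iff_toLex (a b : Int × Int) : pvLt a b ↔ (toLex a : Int ×ₗ Int) < toLex b := by
  rw [Prod.Lex.toLex_lt_toLex]; rfl

theorem pvLt_irrefl (a : Int × Int) : ¬ pvLt a a := by
  simp [pvLt]

theorem getD_map_range (n : Nat) (f : Nat → Bool) (i : Nat) :
    ((List.range n).map f)[i]?.getD false = if i < n then f i else false := by
  rcases Nat.lt_or_ge i n with h | h
  · rw [List.getElem?_eq_getElem (by simpa using h)]
    simp [h]
  · rw [List.getElem?_eq_none (by simpa using h)]
    simp [Nat.not_lt.mpr h]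

theorem sorted2_eq_sorted_lex (xs : List (Int × Int)) :
    PySem.List.sorted2 xs Prod.fst Prod.snd false
      = PySem.List.sorted xs (fun p => (toLex p : Int ×ₗ Int)) false := by
  have h : (fun (a b : Int × Int) =>
        decide (a.1 < b.1) || (!decide (b.1 < a.1) && decide (a.2 < b.2)))
      = fun (a b : Int × Int) => decide ((toLex a : Int ×ₗ Int) < toLex b) := by
    funext a b
    rw [Bool.eq_iff_iff]
    simp only [Bool.or_eq_true, Bool.and_eq_true, Bool.not_eq_true', decide_eq_true_eq,
      decide_eq_false_iff_not, Prod.Lex.toLex_lt_toLex]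
    omega
  simp only [PySem.List.sorted2, PySem.List.sorted, if_neg, Bool.false_eq_true,
    not_false_iff]
  rw [h]

theorem inner_spec (ft : List Int) (treated : List Bool) (k : Nat) :
    ((List.range k).foldl (pvInnerF ft treated) (none, -1) = (none, -1) ∧
       ∀ i < k, treated[i]?.getD false = true) ∨
    (∃ j, j < k ∧ treated[j]?.getD false = false ∧
       (List.range k).foldl (pvInnerF ft treated) (none, -1) = (some (ft[j]?.getD 0), (j : Int)) ∧
       ∀ i < k, treated[i]?.getD false = false → i ≠ j → pvLt (pvPair ft j) (pvPair ft i)) := by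
  induction k with
  | zero => exact Or.inl ⟨rfl, fun i hi => absurd hi (Nat.not_lt_zero i)⟩
  | succ k ih =>
    rw [List.range_succ, List.foldl_append, List.foldl_cons, List.foldl_nil]
    rcases ih with ⟨hr, hall⟩ | ⟨j, hj, huj, hr, hmax⟩
    · rw [hr]
      by_cases hk : treated[k]?.getD false = true
      · refine Or.inl ⟨by simp [pvInnerF, hk], ?_⟩
        intro i hi
        rcases Nat.lt_succ_iff_lt_or_eq.mp hi with h | h
        · exact hall i h
        · subst h; exact hk
      · have hk' : treated[k]?.getD false = false := by
          cases h : treated[k]?.getD false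
          · rfl
          · exact absurd h hk
        refine Or.inr ⟨k, Nat.lt_succ_self k, hk', by simp [pvInnerF, hk', pvGtNegInf], ?_⟩
        intro i hi hf hne
        rcases Nat.lt_succ_iff_lt_or_eq.mp hi with h | h
        · rw [hall i h] at hf; cases hf
        · exact absurd h hne
    · rw [hr]
      by_cases hk : treated[k]?.getD false = true
      · refine Or.inr ⟨j, Nat.lt_succ_of_lt hj, huj, by simp [pvInnerF, hk], ?_⟩
        intro i hi hf hne
        rcases Nat.lt_succ_iff_lt_or_eq.mp hi with h | h
        · exact hmax i h hf hne
        · subst h; rw [hk] at hf; cases hf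
      · have hk' : treated[k]?.getD false = false := by
          cases h : treated[k]?.getD false
          · rfl
          · exact absurd h hk
        by_cases hlt : ft[j]?.getD 0 < ft[k]?.getD 0
        · refine Or.inr ⟨k, Nat.lt_succ_self k, hk',
            by simp [pvInnerF, hk', pvGtNegInf, hlt], ?_⟩
          intro i hi hf hne
          have hik : i < k := by
            rcases Nat.lt_succ_iff_lt_or_eq.mp hi with h | h
            · exact h
            · exact absurd h hne
          by_cases hij : i = j
          · subst hij
            simp only [pvPair, pvLt]
            left; omega
          · have h2 := hmax i hik hf hij
            simp only [pvPair, pvLt] at h2 ⊢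
            omega
        · refine Or.inr ⟨j, Nat.lt_succ_of_lt hj, huj,
            by simp [pvInnerF, hk', pvGtNegInf, hlt], ?_⟩
          intro i hi hf hne
          rcases Nat.lt_succ_iff_lt_or_eq.mp hi with h | h
          · exact hmax i h hf hne
          · subst h
            simp only [pvPair, pvLt]
            omega

theorem outer_spec (ft : List Int) (m : Nat) (hm : m ≤ ft.length) :
    ∃ picked : List Nat,
      (List.range m).foldl (pvOuterF ft) (([] : List Int), List.replicate ft.length false)
        = (picked.map pvSucc,
           (List.range ft.length).map (fun i => decide (i ∈ picked))) ∧
      picked.length = m ∧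
      (∀ j ∈ picked, j < ft.length) ∧
      List.Pairwise (fun a b => pvLt (pvPair ft a) (pvPair ft b)) picked ∧
      (∀ j ∈ picked, ∀ i < ft.length, i ∉ picked → pvLt (pvPair ft j) (pvPair ft i)) := by
  induction m with
  | zero =>
    refine ⟨[], ?_, rfl, by simp, List.Pairwise.nil, by simp⟩
    simp [List.map_const']
  | succ m ih =>
    obtain ⟨picked, hstate, hlen, hmem, hpw, hsep⟩ := ih (Nat.le_of_succ_le hm)
    have hnodup : picked.Nodup := by
      refine hpw.imp ?_
      intro a b h hab
      subst hab
      exact pvLt_irrefl _ h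
    have hex : ∃ i, i < ft.length ∧
        (((List.range ft.length).map (fun i => decide (i ∈ picked)))[i]?.getD false = false) := by
      by_contra hc
      push Not at hc
      have hsub : List.range ft.length ⊆ picked := by
        intro i hi
        have hi' := List.mem_range.mp hi
        have := hc i hi'
        rw [getD_map_range, if_pos hi'] at this
        simpa using this
      have := (List.subperm_of_subset List.nodup_range hsub).length_le
      simp [hlen] at this
      omega
    rw [List.range_succ, List.foldl_append, List.foldl_cons, List.foldl_nil, hstate]
    rcases inner_spec ft ((List.range ft.length).map (fun i => decide (i ∈ picked)))
        ft.length with ⟨_, hall⟩ | ⟨j, hj, huj, hr, hmax⟩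
    · obtain ⟨i, hi, hfi⟩ := hex
      rw [hall i hi] at hfi
      cases hfi
    · have hjnot : j ∉ picked := by
        rw [getD_map_range, if_pos hj] at huj
        simpa using huj
      refine ⟨picked ++ [j], ?_, by simp [hlen], ?_, ?_, ?_⟩
      · show pvOuterF ft _ m = _
        rw [pvOuterF, hr]
        have hidx : (if ((j : Int)) < 0 then (j : Int) + (ft.length : Int) else (j : Int)).toNat
            = j := by
          rw [if_neg (by omega)]
          exact Int.toNat_natCast j
        simp only [hidx]
        rw [Prod.mk.injEq]
        refine ⟨?_, ?_⟩
        · simp [pvSucc]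
        · apply List.ext_getElem
          · simp
          · intro i hi1 hi2
            simp only [List.length_set, List.length_map, List.length_range] at hi1
            rw [List.getElem_set]
            simp only [List.getElem_map, List.getElem_range, List.mem_append,
              List.mem_singleton]
            by_cases hij : j = i
            · subst hij; simp
            · simp only [hij, if_false, decide_eq_decide]
              constructor
              · exact Or.inl
              · rintro (h | h)
                · exact h
                · exact absurd h.symm hij
      · intro x hx
        rcases List.mem_append.mp hx with h | h
        · exact hmem x h
        · rw [List.mem_singleton.mp h]; exact hj
      · rw [List.pairwise_append]
        refine ⟨hpw, List.pairwise_singleton _ _, ?_⟩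
        intro a ha b hb
        rw [List.mem_singleton.mp hb]
        exact hsep a ha j hj hjnot
      · intro x hx i hi hinot
        have hinotp : i ∉ picked := fun h => hinot (List.mem_append.mpr (Or.inl h))
        have hinotj : i ≠ j := fun h => hinot (by simp [h])
        have hui : (((List.range ft.length).map (fun i => decide (i ∈ picked)))[i]?.getD false)
            = false := by
          rw [getD_map_range, if_pos hi]
          simpa using hinotp
        rcases List.mem_append.mp hx with h | h
        · exact hsep x h i hi hinotp
        · rw [List.mem_singleton.mp h]
          exact hmax i hi hui hinotj

-- ===== VERDICT (by name: the statement is the Claim_ definition above) =====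
theorem getOrderedVertices_spec : Claim_equal_getOrderedVertices := by
  intro ft _
  unfold Spec_getOrderedVertices
  obtain ⟨picked, hstate, hlen, hmem, hpw, _⟩ := outer_spec ft ft.length le_rfl
  have hA : getOrderedVertices ft = picked.map pvSucc := by
    have h0 : getOrderedVertices ft
        = ((List.range ft.length).foldl (pvOuterF ft)
            (([] : List Int), List.replicate ft.length false)).1 := rfl
    rw [h0, hstate]
  have hnodup : picked.Nodup := by
    refine hpw.imp ?_
    intro a b h hab
    subst hab
    exact pvLt_irrefl _ h
  have hperm : picked.Perm (List.range ft.length) := by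
    refine (List.subperm_of_subset hnodup ?_).perm_of_length_le (by simp [hlen])
    intro j hj
    exact List.mem_range.mpr (hmem j hj)
  have hpairs : (PySem.List.enumerate ft 0).map (fun q => (-q.2, q.1))
      = (List.range ft.length).map (pvPair ft) := by
    apply List.ext_getElem
    · simp [PySem.List.length_enumerate]
    · intro i hi1 hi2
      simp only [List.length_map, PySem.List.length_enumerate] at hi1
      rw [List.getElem_map, List.getElem_map, List.getElem_range,
        PySem.List.getElem_enumerate]
      simp [pvPair, List.getElem?_eq_getElem hi1]
  have hsorted : PySem.List.sorted ((PySem.List.enumerate ft 0).map (fun q => (-q.2, q.1)))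
      (fun p => (toLex p : Int ×ₗ Int)) false = picked.map (pvPair ft) := by
    apply PySem.List.sorted_eq_of_perm_of_pairwise_lt
    · rw [hpairs]
      exact hperm.map _
    · rw [List.pairwise_map]
      exact hpw.imp (fun h => (pvLt_iff_toLex _ _).mp h)
  rw [hA]
  have hB : getOrderedVertices_alt ft
      = (PySem.List.sorted2 ((PySem.List.enumerate ft 0).map (fun q => (-q.2, q.1)))
          Prod.fst Prod.snd false).map (fun p => p.2 + 1) := rfl
  rw [hB, sorted2_eq_sorted_lex, hsorted, List.map_map]
  rfl
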